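-- pv_equiv track=rewrite | github.com/mrzichang2152-boop/duanju | backend/app/api/script.py | _split_markdown_table_line
-- ===== SOURCE A (Python) =====
-- def _split_markdown_table_line(line: str) -> list[str]:
--     parts: list[str] = []
--     current = ""
--     bracket_depth = 0
--     escaped = False
--     for ch in str(line or ""):
--         if escaped:
--             current += ch
--             escaped = False
--             continue
--         if ch == "\\":
--             escaped = True
--             current += ch
--             continue
--         if ch == "[":
--             bracket_depth += 1
--             current += ch
--             continue
--         if ch == "]":
--             bracket_depth = max(0, bracket_depth - 1)
--             current += ch
--             continue
--         if ch == "|" and bracket_depth == 0: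
--             parts.append(current)
--             current = ""
--             continue
--         current += ch
--     parts.append(current)
--     if parts and parts[0].strip() == "":
--         parts.pop(0)
--     if parts and parts[-1].strip() == "":
--         parts.pop()
--     return parts
-- ===== SOURCE B (Python) =====
-- def _split_markdown_table_line(line: str) -> list[str]:
--     s = str(line or "")
--     # one pass: record the index of every unescaped, unbracketed '|'
--     cuts: list[int] = []
--     bracket_depth = 0
--     escaped = False
--     for i, ch in enumerate(s):
--         if escaped:
--             escaped = False
--         elif ch == "\\":
--             escaped = True
--         elif ch == "[":
--             bracket_depth += 1
--         elif ch == "]":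
--             bracket_depth = max(0, bracket_depth - 1)
--         elif ch == "|" and bracket_depth == 0:
--             cuts.append(i)
--     bounds = [-1] + cuts + [len(s)]
--     parts = [s[a + 1:b] for a, b in zip(bounds, bounds[1:])]
--     if parts[0].strip() == "":
--         parts = parts[1:]
--     if parts and parts[-1].strip() == "":
--         parts = parts[:-1]
--     return parts
-- ===== Notes on version B (the rewrite author's own statement) =====
-- stated objective: alternative
-- what changed: B runs the same escape/bracket state machine but only records the indices of the delimiter pipes, then builds the cells by slicing the line between consecutive cut positions, instead of accumulating a growing current-cell string and appending it at each pipe.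
import Mathlib
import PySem

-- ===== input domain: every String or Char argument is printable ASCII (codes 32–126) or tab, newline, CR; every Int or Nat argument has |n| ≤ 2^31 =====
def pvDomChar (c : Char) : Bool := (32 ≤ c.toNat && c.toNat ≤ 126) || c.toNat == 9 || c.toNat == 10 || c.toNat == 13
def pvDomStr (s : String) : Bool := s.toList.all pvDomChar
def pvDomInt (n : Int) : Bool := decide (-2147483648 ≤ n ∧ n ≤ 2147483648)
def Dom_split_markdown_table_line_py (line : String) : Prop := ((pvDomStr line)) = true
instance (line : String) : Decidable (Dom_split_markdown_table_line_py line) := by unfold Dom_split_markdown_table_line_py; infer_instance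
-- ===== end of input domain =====

-- B records the indices of the delimiter pipes in one pass and then slices the line
-- between them, instead of accumulating a growing current-cell string (objective: alternative).

-- ===== PORT A =====
-- loop body of A: state (parts, current, bracket_depth, escaped)
def pvGoA (st : List String × List Char × Int × Bool) (ch : Char) :
    List String × List Char × Int × Bool :=
  let (parts, cur, depth, esc) := st
  if esc then (parts, cur ++ [ch], depth, false)
  else if ch = '\\' then (parts, cur ++ [ch], depth, true)
  else if ch = '[' then (parts, cur ++ [ch], depth + 1, esc)
  else if ch = ']' then (parts, cur ++ [ch], max 0 (depth - 1), esc)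
  else if ch = '|' ∧ depth = 0 then (parts ++ [String.ofList cur], [], depth, esc)
  else (parts, cur ++ [ch], depth, esc)

-- `str(line or "")` is the identity on a str argument, so we iterate over line itself
def split_markdown_table_line_py (line : String) : List String :=
  let r := line.toList.foldl pvGoA ([], [], 0, false)
  let parts := r.1 ++ [String.ofList r.2.1]
  let parts := if parts ≠ [] ∧ PySem.Str.strip (parts.headD "") = "" then parts.tail else parts
  if parts ≠ [] ∧ PySem.Str.strip (parts.getLastD "") = "" then parts.dropLast else parts

-- ===== PORT B =====
-- loop body of B: state (cuts, bracket_depth, escaped); only indices are recorded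
def pvGoB (st : List Int × Int × Bool) (p : Int × Char) : List Int × Int × Bool :=
  let (cuts, depth, esc) := st
  if esc then (cuts, depth, false)
  else if p.2 = '\\' then (cuts, depth, true)
  else if p.2 = '[' then (cuts, depth + 1, esc)
  else if p.2 = ']' then (cuts, max 0 (depth - 1), esc)
  else if p.2 = '|' ∧ depth = 0 then (cuts ++ [p.1], depth, esc)
  else (cuts, depth, esc)

def split_markdown_table_line_py_alt (line : String) : List String :=
  let s := line.toList
  let r := (PySem.List.enumerate s 0).foldl pvGoB ([], 0, false)
  let bounds := [(-1 : Int)] ++ r.1 ++ [(s.length : Int)]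
  let parts := (bounds.zip bounds.tail).map
    (fun ab => String.ofList (PySem.List.slice s (some (ab.1 + 1)) (some ab.2)))
  let parts := if PySem.Str.strip (parts.headD "") = "" then parts.tail else parts
  if parts ≠ [] ∧ PySem.Str.strip (parts.getLastD "") = "" then parts.dropLast else parts

-- ===== PRECONDITION & SPEC =====
def Spec_split_markdown_table_line_py (line : String) (out : List String) : Prop := out = split_markdown_table_line_py_alt line
instance (line : String) (out : List String) : Decidable (Spec_split_markdown_table_line_py line out) := by unfold Spec_split_markdown_table_line_py; infer_instance

-- ===== CLAIM (what is proved, stated in full; the proofs are below) =====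
def Claim_equal_split_markdown_table_line_py : Prop := ∀ (line : String), Dom_split_markdown_table_line_py line → Spec_split_markdown_table_line_py line (split_markdown_table_line_py line)

-- ===== LEMMAS AND PROOFS =====

-- the list of cells (as char lists) produced by the shared state machine
def pvConsHead (ch : Char) : List (List Char) → List (List Char)
  | [] => [[ch]]
  | g :: gs => (ch :: g) :: gs

def pvSegs : List Char → Int → Bool → List (List Char)
  | [], _, _ => [[]]
  | ch :: s, d, e =>
    if e then pvConsHead ch (pvSegs s d false)
    else if ch = '\\' then pvConsHead ch (pvSegs s d true)
    else if ch = '[' then pvConsHead ch (pvSegs s (d + 1) e)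
    else if ch = ']' then pvConsHead ch (pvSegs s (max 0 (d - 1)) e)
    else if ch = '|' ∧ d = 0 then [] :: pvSegs s d e
    else pvConsHead ch (pvSegs s d e)

-- delimiter positions, relative to the current suffix
def pvRelCuts : List Char → Int → Bool → List Nat
  | [], _, _ => []
  | ch :: s, d, e =>
    if e then (pvRelCuts s d false).map (· + 1)
    else if ch = '\\' then (pvRelCuts s d true).map (· + 1)
    else if ch = '[' then (pvRelCuts s (d + 1) e).map (· + 1)
    else if ch = ']' then (pvRelCuts s (max 0 (d - 1)) e).map (· + 1)
    else if ch = '|' ∧ d = 0 then 0 :: (pvRelCuts s d e).map (· + 1)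
    else (pvRelCuts s d e).map (· + 1)

theorem pvConsHead_ne_nil (ch : Char) (l : List (List Char)) : pvConsHead ch l ≠ [] := by
  cases l <;> simp [pvConsHead]

theorem pvSegs_ne_nil (s : List Char) (d : Int) (e : Bool) : pvSegs s d e ≠ [] := by
  cases s with
  | nil => simp [pvSegs]
  | cons ch s => simp only [pvSegs]; split_ifs <;> simp [pvConsHead_ne_nil]

def pvStrParts (cur : List Char) : List (List Char) → List String
  | [] => [String.ofList cur]
  | g :: t => String.ofList (cur ++ g) :: t.map String.ofList

theorem pvFoldA_eq (s : List Char) : ∀ (parts : List String) (cur : List Char) (d : Int) (e : Bool),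
    (s.foldl pvGoA (parts, cur, d, e)).1 ++ [String.ofList (s.foldl pvGoA (parts, cur, d, e)).2.1]
      = parts ++ pvStrParts cur (pvSegs s d e) := by
  induction s with
  | nil => intro parts cur d e; simp [pvSegs, pvStrParts]
  | cons ch s ih =>
    intro parts cur d e
    simp only [List.foldl_cons, pvGoA, pvSegs]
    split_ifs with h1 h2 h3 h4 h5
    · rw [ih]
      cases hg : pvSegs s d false with
      | nil => exact absurd hg (pvSegs_ne_nil s d false)
      | cons g t => simp [pvConsHead, pvStrParts]
    · rw [ih]
      cases hg : pvSegs s d true with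
      | nil => exact absurd hg (pvSegs_ne_nil s d true)
      | cons g t => simp [pvConsHead, pvStrParts]
    · rw [ih]
      cases hg : pvSegs s (d + 1) e with
      | nil => exact absurd hg (pvSegs_ne_nil s (d + 1) e)
      | cons g t => simp [pvConsHead, pvStrParts]
    · rw [ih]
      cases hg : pvSegs s (max 0 (d - 1)) e with
      | nil => exact absurd hg (pvSegs_ne_nil s (max 0 (d - 1)) e)
      | cons g t => simp [pvConsHead, pvStrParts]
    · rw [ih]
      cases hg : pvSegs s d e with
      | nil => exact absurd hg (pvSegs_ne_nil s d e)
      | cons g t => simp [pvStrParts]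
    · rw [ih]
      cases hg : pvSegs s d e with
      | nil => exact absurd hg (pvSegs_ne_nil s d e)
      | cons g t => simp [pvConsHead, pvStrParts]

theorem pvFoldB_eq (s : List Char) : ∀ (i : Int) (cuts : List Int) (d : Int) (e : Bool),
    ((PySem.List.enumerate s i).foldl pvGoB (cuts, d, e)).1
      = cuts ++ (pvRelCuts s d e).map (fun (k : Nat) => i + (k : Int)) := by
  induction s with
  | nil => intro i cuts d e; simp [PySem.List.enumerate_nil, pvRelCuts]
  | cons ch s ih =>
    intro i cuts d e
    rw [PySem.List.enumerate_cons]
    simp only [List.foldl_cons, pvGoB, pvRelCuts]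
    split_ifs with h1 h2 h3 h4 h5 <;> rw [ih] <;> simp <;> (intro a _; omega)

-- cells of s cut at the given absolute positions, starting at index st
def pvGoP (s : List Char) : Nat → List Nat → List (List Char)
  | st, [] => [s.drop st]
  | st, c :: cs => (s.drop st).take (c - st) :: pvGoP s (c + 1) cs

theorem pvZip_eq_goP (s : List Char) (cuts : List Nat) : ∀ (st : Nat),
    ((((st : Int) - 1) :: (cuts.map (Nat.cast) ++ [(s.length : Int)])).zip
        (cuts.map (Nat.cast) ++ [(s.length : Int)])).map
      (fun ab => PySem.List.slice s (some (ab.1 + 1)) (some ab.2))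
      = pvGoP s st cuts := by
  induction cuts with
  | nil =>
    intro st
    simp only [List.map_nil, List.nil_append, List.zip_cons_cons, List.zip_nil_right,
      List.map_cons, List.map_nil, pvGoP]
    rw [show ((st : Int) - 1 + 1) = ((st : Nat) : Int) from by ring, PySem.List.slice_natCast]
    simp [List.take_of_length_le]
  | cons c cs ih =>
    intro st
    simp only [List.map_cons, List.cons_append, List.zip_cons_cons, List.map_cons, pvGoP]
    refine List.cons_eq_cons.mpr ⟨?_, ?_⟩
    · rw [show ((st : Int) - 1 + 1) = ((st : Nat) : Int) from by ring, PySem.List.slice_natCast]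
    · rw [show ((c : Nat) : Int) = (((c + 1 : Nat) : Int) - 1) from by push_cast; ring]
      exact ih (c + 1)

theorem pvGoP_shift (ch : Char) (s : List Char) (cuts : List Nat) : ∀ (st : Nat),
    pvGoP (ch :: s) (st + 1) (cuts.map (· + 1)) = pvGoP s st cuts := by
  induction cuts with
  | nil => intro st; simp [pvGoP]
  | cons c cs ih =>
    intro st
    simp only [List.map_cons, pvGoP, List.drop_succ_cons, Nat.succ_sub_succ]
    exact List.cons_eq_cons.mpr ⟨rfl, ih (c + 1)⟩

theorem pvGoP_cons (ch : Char) (s : List Char) (cuts : List Nat) :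
    pvGoP (ch :: s) 0 (cuts.map (· + 1)) = pvConsHead ch (pvGoP s 0 cuts) := by
  cases cuts with
  | nil => simp [pvGoP, pvConsHead]
  | cons c cs =>
    simp only [List.map_cons, pvGoP, List.drop_zero, Nat.sub_zero, List.take_succ_cons,
      pvConsHead]
    exact List.cons_eq_cons.mpr ⟨rfl, pvGoP_shift ch s cs (c + 1)⟩

theorem pvGoP_eq_segs (s : List Char) : ∀ (d : Int) (e : Bool),
    pvGoP s 0 (pvRelCuts s d e) = pvSegs s d e := by
  induction s with
  | nil => intro d e; simp [pvGoP, pvRelCuts, pvSegs]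
  | cons ch s ih =>
    intro d e
    simp only [pvRelCuts, pvSegs]
    split_ifs with h1 h2 h3 h4 h5
    · rw [pvGoP_cons, ih]
    · rw [pvGoP_cons, ih]
    · rw [pvGoP_cons, ih]
    · rw [pvGoP_cons, ih]
    · simp only [pvGoP, Nat.sub_self, List.take_zero]
      exact List.cons_eq_cons.mpr ⟨rfl, by rw [pvGoP_shift ch s _ 0, ih]⟩
    · rw [pvGoP_cons, ih]

-- ===== VERDICT (by name: the statement is the Claim_ definition above) =====
theorem split_markdown_table_line_py_spec : Claim_equal_split_markdown_table_line_py := by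
  intro line _
  unfold Spec_split_markdown_table_line_py
  simp only [split_markdown_table_line_py, split_markdown_table_line_py_alt]
  have hA := pvFoldA_eq line.toList [] [] 0 false
  have hB := pvFoldB_eq line.toList 0 [] 0 false
  have hsegs : pvStrParts [] (pvSegs line.toList 0 false)
      = (pvSegs line.toList 0 false).map String.ofList := by
    cases hg : pvSegs line.toList 0 false with
    | nil => exact absurd hg (pvSegs_ne_nil _ _ _)
    | cons g t => simp [pvStrParts]
  rw [List.nil_append, hsegs] at hA
  rw [List.nil_append] at hB
  have hmap : (pvRelCuts line.toList 0 false).map (fun (k : Nat) => (0 : Int) + (k : Int))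
      = (pvRelCuts line.toList 0 false).map (Nat.cast) := by
    apply List.map_congr_left; intro k _; ring
  rw [hmap] at hB
  have hz := pvZip_eq_goP line.toList (pvRelCuts line.toList 0 false) 0
  rw [show ((0 : Nat) : Int) - 1 = (-1 : Int) from by norm_num] at hz
  rw [hA, List.singleton_append, hB]
  have hBparts :
      (((-1 : Int) :: ((pvRelCuts line.toList 0 false).map (Nat.cast) ++ [(line.toList.length : Int)])).zip
          ((pvRelCuts line.toList 0 false).map (Nat.cast) ++ [(line.toList.length : Int)])).map
        (fun ab => String.ofList (PySem.List.slice line.toList (some (ab.1 + 1)) (some ab.2)))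
      = (pvSegs line.toList 0 false).map String.ofList := by
    have : (fun (ab : Int × Int) => String.ofList (PySem.List.slice line.toList (some (ab.1 + 1)) (some ab.2)))
        = String.ofList ∘ (fun ab => PySem.List.slice line.toList (some (ab.1 + 1)) (some ab.2)) := rfl
    rw [this, ← List.map_map, hz, pvGoP_eq_segs]
  rw [List.cons_append, List.tail_cons]
  rw [hBparts]
  cases hP : (pvSegs line.toList 0 false).map String.ofList with
  | nil => exact absurd hP (by simp [pvSegs_ne_nil])
  | cons p ps => simp
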